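-- pv_equiv track=rewrite | github.com/bullishoptionstrat-hub/openclaw-vs2 | QuantumEdge/research/fib2/data.py | build_date_to_1h_range
-- ===== SOURCE A (Python) =====
-- def build_date_to_1h_range(
--     daily_bars: dict,
--     hourly_bars: dict,
-- ) -> dict[str, tuple[int, int]]:
--     """
--     Returns a mapping: date_str -> (h_start_idx, h_end_idx_exclusive)
--     so that hourly_bars[h_start:h_end] are all bars on that calendar date.
--     """
--     mapping: dict[str, tuple[int, int]] = {}
--     h_dates = hourly_bars["dates"]
--     n_h = len(h_dates)
--
--     i = 0
--     while i < n_h: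
--         d = h_dates[i]
--         j = i
--         while j < n_h and h_dates[j] == d:
--             j += 1
--         mapping[d] = (i, j)
--         i = j
--
--     return mapping
-- ===== SOURCE B (Python) =====
-- def build_date_to_1h_range(
--     daily_bars: dict,
--     hourly_bars: dict,
-- ) -> dict[str, tuple[int, int]]:
--     # Staged passes instead of a nested index scan:
--     # 1) find every run-start boundary by comparing each date with its predecessor,
--     # 2) the run ends are the boundary list shifted by one (with the total length appended),
--     # 3) zip starts with ends into the mapping.
--     h = hourly_bars["dates"]
--     n = len(h)
--     starts = [k for k in range(n) if k == 0 or h[k] != h[k - 1]]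
--     ends = starts[1:] + ([n] if starts else [])
--     mapping: dict[str, tuple[int, int]] = {}
--     for s, e in zip(starts, ends):
--         mapping[h[s]] = (s, e)
--     return mapping
-- ===== Notes on version B (the rewrite author's own statement) =====
-- stated objective: alternative
-- what changed: Replaced the nested while-loop run scan with staged passes: detect all run-start boundaries by comparing each date with its predecessor, derive the run ends by shifting the boundary list, and zip starts with ends into the mapping.
import Mathlib
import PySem

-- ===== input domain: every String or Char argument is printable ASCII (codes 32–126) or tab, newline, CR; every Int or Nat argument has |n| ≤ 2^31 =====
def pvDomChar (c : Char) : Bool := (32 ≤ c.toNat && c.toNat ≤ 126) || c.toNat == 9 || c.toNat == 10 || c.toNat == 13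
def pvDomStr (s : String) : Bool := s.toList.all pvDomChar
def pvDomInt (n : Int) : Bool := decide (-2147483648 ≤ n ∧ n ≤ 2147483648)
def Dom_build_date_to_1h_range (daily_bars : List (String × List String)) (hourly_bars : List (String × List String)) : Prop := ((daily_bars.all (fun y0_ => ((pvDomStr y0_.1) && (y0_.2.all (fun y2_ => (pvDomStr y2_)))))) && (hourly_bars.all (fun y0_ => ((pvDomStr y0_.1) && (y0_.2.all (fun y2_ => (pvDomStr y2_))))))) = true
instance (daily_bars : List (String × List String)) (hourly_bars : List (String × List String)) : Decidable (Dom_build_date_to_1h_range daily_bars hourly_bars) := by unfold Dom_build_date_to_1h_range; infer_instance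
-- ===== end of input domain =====

-- B replaces A's nested while-loop run scan with staged passes: find all run-start
-- boundaries by comparing each date with its predecessor, shift that list to get the
-- run ends, and zip starts with ends into the mapping (alternative decomposition, same cost).

-- ===== PORT A =====
-- inner 'while j < n_h and h_dates[j] == d: j += 1' — returns the final j
def pvAInner (h : List String) (d : String) (j : Nat) : Nat :=
  if hj : j < h.length then
    if h[j] == d then pvAInner h d (j + 1) else j
  else j
termination_by h.length - j

-- the outer loop needs j > i to terminate: one unfold of pvAInner at a matching index
theorem pvAInner_lt (h : List String) (d : String) (i : Nat)
    (hi : i < h.length) (hd : h[i] == d) : i < pvAInner h d i := by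
  have hle : ∀ j, j ≤ pvAInner h d j := by
    intro j
    induction j using pvAInner.induct h d with
    | case1 j hj hd ih => rw [pvAInner]; simp only [hj, ↓reduceDIte, hd, if_true]; omega
    | case2 j hj hd => rw [pvAInner]; simp [hj, hd]
    | case3 j hj => rw [pvAInner]; simp [hj]
  rw [pvAInner]
  simp only [hi, ↓reduceDIte, hd, if_true]
  have := hle (i + 1); omega

-- outer 'while i < n_h: … mapping[d] = (i, j); i = j'
def pvAOuter (h : List String) (i : Nat) (m : PySem.Dict String (Int × Int)) :
    List (String × Int × Int) :=
  if hi : i < h.length then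
    let d := h[i]
    let j := pvAInner h d i
    pvAOuter h j (m.insert d ((i : Int), (j : Int)))
  else m.items
termination_by h.length - i
decreasing_by
  have := pvAInner_lt h h[i] i hi (by simp)
  omega

def build_date_to_1h_range (daily_bars : List (String × List String)) (hourly_bars : List (String × List String)) : List (String × Int × Int) :=
  match (PySem.Dict.mk hourly_bars).get? "dates" with
  | some h_dates => pvAOuter h_dates 0 PySem.Dict.empty
  | none => []  -- KeyError in Python; excluded by Pre_

-- ===== PORT B =====
-- 'starts = [k for k in range(n) if k == 0 or h[k] != h[k-1]]; ends = starts[1:] + ([n] if starts else []);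
--  for s, e in zip(starts, ends): mapping[h[s]] = (s, e)'
-- h[k], h[k-1], h[s] are in-range Python indexings (k < n, 1 ≤ k for h[k-1], s < n), so .getD is exact there.
def build_date_to_1h_range_alt (daily_bars : List (String × List String)) (hourly_bars : List (String × List String)) : List (String × Int × Int) :=
  match (PySem.Dict.mk hourly_bars).get? "dates" with
  | some h =>
      let n := h.length
      let starts := (List.range n).filter (fun k => k == 0 || !(h.getD k "" == h.getD (k - 1) ""))
      let ends := starts.tail ++ (if starts.isEmpty then [] else [n])
      ((starts.zip ends).foldl
        (fun m se => m.insert (h.getD se.1 "") ((se.1 : Int), (se.2 : Int)))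
        PySem.Dict.empty).items
  | none => []  -- KeyError in Python; excluded by Pre_

-- ===== PRECONDITION & SPEC =====
-- Pre_: the key "dates" must be present, else Python raises KeyError.
def Pre_build_date_to_1h_range (daily_bars : List (String × List String)) (hourly_bars : List (String × List String)) : Prop :=
  (PySem.Dict.mk hourly_bars).contains "dates" = true
instance (daily_bars : List (String × List String)) (hourly_bars : List (String × List String)) : Decidable (Pre_build_date_to_1h_range daily_bars hourly_bars) := by unfold Pre_build_date_to_1h_range; infer_instance

def pvWitness_build_date_to_1h_range : (List (String × List String)) × (List (String × List String)) :=
  ([("2024-01-01", ["o"])], [("dates", ["2024-01-01", "2024-01-01", "2024-01-02"])])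

def Spec_build_date_to_1h_range (daily_bars : List (String × List String)) (hourly_bars : List (String × List String)) (out : List (String × Int × Int)) : Prop := out = build_date_to_1h_range_alt daily_bars hourly_bars
instance (daily_bars : List (String × List String)) (hourly_bars : List (String × List String)) (out : List (String × Int × Int)) : Decidable (Spec_build_date_to_1h_range daily_bars hourly_bars out) := by unfold Spec_build_date_to_1h_range; infer_instance

-- ===== CLAIM (what is proved, stated in full; the proofs are below) =====
def Claim_equal_build_date_to_1h_range : Prop := ∀ (daily_bars : List (String × List String)) (hourly_bars : List (String × List String)), Dom_build_date_to_1h_range daily_bars hourly_bars → Pre_build_date_to_1h_range daily_bars hourly_bars → Spec_build_date_to_1h_range daily_bars hourly_bars (build_date_to_1h_range daily_bars hourly_bars)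

-- ===== LEMMAS AND PROOFS =====

-- canonical run recursion both ports are reduced to
def pvRec (h : List String) (off : Nat) (m : PySem.Dict String (Int × Int)) :
    PySem.Dict String (Int × Int) :=
  match h with
  | [] => m
  | d :: rest =>
      let run := 1 + (rest.takeWhile (fun x => x == d)).length
      pvRec (rest.dropWhile (fun x => x == d)) (off + run) (m.insert d ((off : Int), ((off + run : Nat) : Int)))
termination_by h.length
decreasing_by
  have := List.length_dropWhile_le (fun x => x == d) rest
  simp; omega

-- the inner scan computes i + (length of the run of elements equal to d starting at i)
theorem pvAInner_eq (h : List String) (d : String) :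
    ∀ j, pvAInner h d j = j + ((h.drop j).takeWhile (fun x => x == d)).length := by
  intro j
  induction j using pvAInner.induct h d with
  | case1 j hj hd ih =>
      rw [pvAInner]
      simp only [hj, ↓reduceDIte, hd, if_true, ih]
      rw [List.drop_eq_getElem_cons hj, List.takeWhile_cons]
      simp only [hd, if_true]
      simp
      omega
  | case2 j hj hd =>
      rw [pvAInner]
      rw [List.drop_eq_getElem_cons hj, List.takeWhile_cons]
      simp [hj, hd]
  | case3 j hj =>
      rw [pvAInner]
      have h0 : h.drop j = [] := List.drop_eq_nil_of_le (by omega)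
      simp [hj, h0]

-- dropWhile drops exactly the takeWhile prefix
theorem pvDropWhile_eq_drop (l : List String) (p : String → Bool) :
    l.dropWhile p = l.drop (l.takeWhile p).length := by
  induction l with
  | nil => simp
  | cons a l ih =>
      by_cases hp : p a <;> simp [hp, ih]

-- A's outer loop from index i is the run recursion on the suffix h.drop i
theorem pvOuter_eq_rec (h : List String) :
    ∀ i m, pvAOuter h i m = (pvRec (h.drop i) i m).items := by
  have key : ∀ k i m, h.length - i ≤ k → pvAOuter h i m = (pvRec (h.drop i) i m).items := by
    intro k
    induction k with
    | zero =>
        intro i m hk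
        rw [pvAOuter]
        have h0 : h.drop i = [] := List.drop_eq_nil_of_le (by omega)
        have hi : ¬ i < h.length := by omega
        simp [hi, h0, pvRec]
    | succ k ih =>
        intro i m hk
        by_cases hi : i < h.length
        · rw [pvAOuter]
          simp only [hi, ↓reduceDIte]
          set t := ((h.drop (i + 1)).takeWhile (fun x => x == h[i])).length with ht
          have hcons : h.drop i = h[i] :: h.drop (i + 1) := List.drop_eq_getElem_cons hi
          have hj : pvAInner h h[i] i = i + (1 + t) := by
            rw [pvAInner_eq, hcons, List.takeWhile_cons]
            simp [ht]
            omega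
          have htlen : i + (1 + t) ≤ h.length := by
            have h1 : t ≤ (h.drop (i + 1)).length :=
              List.Sublist.length_le (List.takeWhile_sublist _)
            rw [List.length_drop] at h1
            omega
          rw [ih (pvAInner h h[i] i) _ (by omega)]
          conv_rhs => rw [hcons, pvRec]
          rw [pvDropWhile_eq_drop, List.drop_drop, ← ht, hj]
          have h2 : i + 1 + t = i + (1 + t) := by omega
          rw [h2]
        · rw [pvAOuter]
          have h0 : h.drop i = [] := List.drop_eq_nil_of_le (by omega)
          simp [hi, h0, pvRec]
  intro i m
  exact key (h.length - i) i m le_rfl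

-- ---- B side: characterising the boundary lists ----

-- B's starts list (the port inlines this expression)
def pvStarts (h : List String) : List Nat :=
  (List.range h.length).filter (fun k => k == 0 || !(h.getD k "" == h.getD (k - 1) ""))

-- boundaries of xs relative to a preceding element d
def pvB (d : String) (xs : List String) : List Nat :=
  (List.range xs.length).filter (fun k => !(xs.getD k "" == (d :: xs).getD k ""))

theorem pvStarts_cons (d : String) (rest : List String) :
    pvStarts (d :: rest) = 0 :: (pvB d rest).map (fun k => k + 1) := by
  unfold pvStarts pvB
  rw [List.length_cons, List.range_succ_eq_map, List.filter_cons, List.filter_map]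
  simp [Function.comp_def, Nat.succ_eq_add_one]

theorem pvB_cons (d x : String) (xs : List String) :
    pvB d (x :: xs) = (if x == d then [] else [0]) ++ (pvB x xs).map (fun k => k + 1) := by
  unfold pvB
  rw [List.length_cons, List.range_succ_eq_map, List.filter_cons, List.filter_map]
  by_cases hx : x == d <;>
    simp [hx, Function.comp_def, Nat.succ_eq_add_one]

-- skipping the leading run of d's shifts the boundaries of the remainder
theorem pvB_run (rest : List String) (d : String) :
    pvB d rest = (pvStarts (rest.dropWhile (fun x => x == d))).map
      (fun k => k + (rest.takeWhile (fun x => x == d)).length) := by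
  induction rest generalizing d with
  | nil => simp [pvB, pvStarts]
  | cons x xs ih =>
      by_cases hx : x == d
      · have hxd : x = d := eq_of_beq hx
        rw [pvB_cons, hx]
        simp only [List.takeWhile_cons, List.dropWhile_cons, hx, if_true]
        rw [hxd, ih d, List.map_map]
        simp only [List.length_cons]
        apply List.map_congr_left
        intro k _
        simp
        omega
      · rw [pvB_cons]
        simp only [hx, if_false, Bool.false_eq_true]
        rw [List.takeWhile_cons_of_neg (by simp [hx]), List.dropWhile_cons_of_neg (by simp [hx])]
        simp only [List.length_nil]
        rw [pvStarts_cons]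
        simp

theorem pvStarts_run (d : String) (rest : List String) :
    pvStarts (d :: rest) = 0 :: (pvStarts (rest.dropWhile (fun x => x == d))).map
      (fun k => k + (1 + (rest.takeWhile (fun x => x == d)).length)) := by
  rw [pvStarts_cons, pvB_run, List.map_map]
  congr 1
  apply List.map_congr_left
  intro k _
  simp [Function.comp]
  omega

-- canonical run list (runs as (start, end) pairs, ends computed by shifting)
def pvRuns (h : List String) : List (Nat × Nat) :=
  match h with
  | [] => []
  | d :: rest =>
      let run := 1 + (rest.takeWhile (fun x => x == d)).length
      (0, run) :: (pvRuns (rest.dropWhile (fun x => x == d))).map (fun p => (p.1 + run, p.2 + run))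
termination_by h.length
decreasing_by
  have := List.length_dropWhile_le (fun x => x == d) rest
  simp; omega

-- zip of starts with the shifted starts list equals the run list
theorem pvZip_eq_runs (h : List String) :
    (pvStarts h).zip ((pvStarts h).tail ++ (if (pvStarts h).isEmpty then [] else [h.length]))
      = pvRuns h := by
  induction h using pvRuns.induct with
  | case1 => simp [pvStarts, pvRuns]
  | case2 d rest ih =>
      rw [pvRuns]
      set T := (rest.takeWhile (fun x => x == d)).length with hT
      set r := rest.dropWhile (fun x => x == d) with hr
      have hlen0 : rest.length = T + r.length := by
        have h := congrArg List.length (List.takeWhile_append_dropWhile (p := fun x => x == d) (l := rest))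
        rw [List.length_append] at h
        have hrl : r.length = (List.dropWhile (fun x => x == d) rest).length := by rw [hr]
        omega
      have hlen : (d :: rest).length = (1 + T) + r.length := by
        rw [List.length_cons]
        omega
      rw [pvStarts_run]
      simp only [List.isEmpty_cons, List.tail_cons]
      rw [if_neg (by simp)]
      cases hrc : r with
      | nil =>
          have hdw : List.dropWhile (fun x => x == d) rest = [] := by rw [← hr, hrc]
          have hdw0 : (List.dropWhile (fun x => x == d) rest).length = 0 := by
            rw [hdw]; rfl
          have hr0 : r.length = 0 := by rw [hrc]; rfl
          simp [pvStarts, hdw, pvRuns, List.zip]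
          omega
      | cons x r' =>
          -- pvStarts r is nonempty with head 0
          have hsr : pvStarts r = 0 :: (pvB x r').map (fun k => k + 1) := by
            rw [hrc]; exact pvStarts_cons x r'
          set Q := (pvB x r').map (fun k => k + 1) with hQ
          have hihz : (0 :: Q).zip (Q ++ [r.length]) = pvRuns r := by
            have h := ih
            rw [hsr] at h
            simpa using h
          rw [hsr]
          simp only [List.map_cons, Nat.zero_add, List.cons_append]
          rw [List.zip_cons_cons]
          congr 1
          have h1 : (1 + T) :: Q.map (fun k => k + (1 + T)) = (0 :: Q).map (fun k => k + (1 + T)) := by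
            simp
          have h2 : Q.map (fun k => k + (1 + T)) ++ [(d :: rest).length]
              = (Q ++ [r.length]).map (fun k => k + (1 + T)) := by
            rw [List.map_append]
            simp only [List.map_cons, List.map_nil]
            rw [hlen]
            congr 2
            omega
          rw [h1, h2, List.zip_map, hihz, hrc]
          apply List.map_congr_left
          intro p _
          simp [Prod.map]

-- folding the shifted run list with absolute-index lookups is the run recursion
theorem pvFold_runs (h : List String) :
    ∀ (P : List String) (m : PySem.Dict String (Int × Int)),
      ((pvRuns h).map (fun p => (P.length + p.1, P.length + p.2))).foldl
        (fun m se => m.insert ((P ++ h).getD se.1 "") ((se.1 : Int), (se.2 : Int))) m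
      = pvRec h P.length m := by
  induction h using pvRuns.induct with
  | case1 => intro P m; simp [pvRuns, pvRec]
  | case2 d rest ih =>
      intro P m
      rw [pvRuns, pvRec]
      set T := (rest.takeWhile (fun x => x == d)).length with hT
      set r := rest.dropWhile (fun x => x == d) with hr
      simp only [List.map_cons, List.map_map, List.foldl_cons]
      have hget0 : (P ++ d :: rest).getD P.length "" = d := by
        simp [List.getD, List.getElem?_append_right (Nat.le_refl P.length)]
      rw [Nat.add_zero, hget0]
      set m1 := m.insert d ((P.length : Int), ((P.length + (1 + T) : Nat) : Int)) with hm1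
      -- use the IH with the consumed prefix appended to P
      have hIH := ih (P ++ d :: rest.takeWhile (fun x => x == d)) m1
      have hPlen : (P ++ d :: rest.takeWhile (fun x => x == d)).length = P.length + (1 + T) := by
        simp [hT]; omega
      have hPapp : (P ++ d :: rest.takeWhile (fun x => x == d)) ++ r = P ++ d :: rest := by
        rw [List.append_assoc]
        simp [hr, List.takeWhile_append_dropWhile]
      rw [hPlen, hPapp] at hIH
      rw [← hIH]
      congr 1
      apply List.map_congr_left
      intro p _
      simp [Prod.ext_iff]
      omega

-- ===== VERDICT (by name: the statement is the Claim_ definition above) =====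
theorem build_date_to_1h_range_spec : Claim_equal_build_date_to_1h_range := by
  intro daily_bars hourly_bars _ _
  unfold Spec_build_date_to_1h_range build_date_to_1h_range build_date_to_1h_range_alt
  cases (PySem.Dict.mk hourly_bars).get? "dates" with
  | none => rfl
  | some h =>
      show pvAOuter h 0 PySem.Dict.empty = _
      rw [pvOuter_eq_rec h 0 PySem.Dict.empty]
      simp only [List.drop_zero]
      have hz : ((List.range h.length).filter
          (fun k => k == 0 || !(h.getD k "" == h.getD (k - 1) ""))) = pvStarts h := rfl
      rw [hz]
      have := pvFold_runs h [] PySem.Dict.empty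
      simp only [List.length_nil, List.nil_append, Nat.zero_add] at this
      rw [pvZip_eq_runs h]
      rw [show (fun p : Nat × Nat => (p.1, p.2)) = id from by funext p; rfl] at this
      rw [List.map_id] at this
      rw [this]
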